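-- pv_equiv track=rewrite | github.com/BNLNPPS/simphony | ana/photon_history_summary.py | decode_seq_history
-- ===== SOURCE A (Python) =====
-- FLAG_ABBREV = {
--     0x00001: "CK",
--     0x00002: "SI",
--     0x00004: "TO",
--     0x00008: "AB",
--     0x00010: "RE",
--     0x00020: "SC",
--     0x00040: "SD",
--     0x00080: "SA",
--     0x00100: "DR",
--     0x00200: "SR",
--     0x00400: "BR",
--     0x00800: "BT",
--     0x01000: "NA",
--     0x02000: "EC",
--     0x04000: "EL",
--     0x08000: "MI",
--     0x10000: "Nat",
--     0x20000: "Mac",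
--     0x40000: "Emi",
--     0x80000: "PS",
--     0x100000: "GS",
--     0x200000: "DF",
-- }
--
-- FFS_TO_FLAG = {i + 1: 1 << i for i in range(16)}
--
-- def flag_abbrev(f):
--     return FLAG_ABBREV.get(f, f"?{f:x}")
--
-- def decode_seq_history(seqhis):
--     """Decode seq nibbles into list of (flag_value, abbrev) tuples."""
--     steps = []
--     for slot in range(32):
--         iseq = slot // 16
--         shift = 4 * (slot - iseq * 16)
--         if iseq == 0:
--             nibble = (seqhis[0] >> shift) & 0xF
--         else:
--             nibble = (seqhis[1] >> shift) & 0xF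
--         if nibble == 0:
--             break
--         f = FFS_TO_FLAG.get(nibble, 0)
--         steps.append((f, flag_abbrev(f)))
--     return steps
-- ===== SOURCE B (Python) =====
-- FLAG_ABBREV = {
--     0x00001: "CK",
--     0x00002: "SI",
--     0x00004: "TO",
--     0x00008: "AB",
--     0x00010: "RE",
--     0x00020: "SC",
--     0x00040: "SD",
--     0x00080: "SA",
--     0x00100: "DR",
--     0x00200: "SR",
--     0x00400: "BR",
--     0x00800: "BT",
--     0x01000: "NA",
--     0x02000: "EC",
--     0x04000: "EL",
--     0x08000: "MI",
--     0x10000: "Nat",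
--     0x20000: "Mac",
--     0x40000: "Emi",
--     0x80000: "PS",
--     0x100000: "GS",
--     0x200000: "DF",
-- }
--
-- FFS_TO_FLAG = {i + 1: 1 << i for i in range(16)}
--
-- def flag_abbrev(f):
--     return FLAG_ABBREV.get(f, f"?{f:x}")
--
-- def decode_seq_history(seqhis):
--     """Decode seq nibbles by shifting a running word instead of recomputing slot offsets."""
--     steps = []
--     for iseq in range(2):
--         v = seqhis[iseq]
--         stop = False
--         for _ in range(16):
--             nibble = v & 0xF
--             if nibble == 0:
--                 stop = True
--                 break
--             f = FFS_TO_FLAG.get(nibble, 0)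
--             steps.append((f, flag_abbrev(f)))
--             v >>= 4
--         if stop:
--             break
--     return steps
-- ===== Notes on version B (the rewrite author's own statement) =====
-- stated objective: simpler
-- what changed: Replaces the flat 32-slot loop that recomputes the word index and bit shift from each slot number with a nested loop: an outer pass over the two words (fetched lazily) and an inner pass that keeps a running value, masking the low nibble and shifting right by 4 each step, with a stop flag on a zero nibble.
import Mathlib
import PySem

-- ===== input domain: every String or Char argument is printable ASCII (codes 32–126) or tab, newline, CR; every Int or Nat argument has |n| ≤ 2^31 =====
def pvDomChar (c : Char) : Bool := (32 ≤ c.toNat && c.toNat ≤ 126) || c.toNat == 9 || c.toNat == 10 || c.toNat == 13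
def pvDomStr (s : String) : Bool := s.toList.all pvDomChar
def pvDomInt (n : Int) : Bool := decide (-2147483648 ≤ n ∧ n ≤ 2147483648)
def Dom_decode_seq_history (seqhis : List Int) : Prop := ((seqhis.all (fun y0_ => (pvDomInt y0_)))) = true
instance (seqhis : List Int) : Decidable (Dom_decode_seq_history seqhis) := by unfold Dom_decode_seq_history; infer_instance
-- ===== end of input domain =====

-- B replaces A's flat 32-slot loop (recomputing word index and shift from the slot number)
-- with a nested word loop over a progressively right-shifted running value; objective: simpler.

-- shared module-level constants and helper (FLAG_ABBREV, FFS_TO_FLAG, flag_abbrev), used by both ports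
def pvFLAG_ABBREV : PySem.Dict Int String := PySem.Dict.ofList
  [(0x00001, "CK"), (0x00002, "SI"), (0x00004, "TO"), (0x00008, "AB"),
   (0x00010, "RE"), (0x00020, "SC"), (0x00040, "SD"), (0x00080, "SA"),
   (0x00100, "DR"), (0x00200, "SR"), (0x00400, "BR"), (0x00800, "BT"),
   (0x01000, "NA"), (0x02000, "EC"), (0x04000, "EL"), (0x08000, "MI"),
   (0x10000, "Nat"), (0x20000, "Mac"), (0x40000, "Emi"), (0x80000, "PS"),
   (0x100000, "GS"), (0x200000, "DF")]

def pvFFS : PySem.Dict Int Int :=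
  (PySem.List.pyRange 0 16 1).foldl (fun d i => d.insert (i + 1) ((1 : Int) <<< i.toNat)) PySem.Dict.empty

-- hand port of f"{f:x}" (lower-case hex; exact for every Int: '-' prefix for negatives)
def pvHexChar (n : Nat) : Char := Char.ofNat (if n < 10 then 48 + n else 87 + n)

def pvHexDigs (n : Nat) : List Char :=
  if n < 16 then [pvHexChar n]
  else pvHexDigs (n / 16) ++ [pvHexChar (n % 16)]
  decreasing_by exact Nat.div_lt_self (by omega) (by omega)

def pvHex (f : Int) : String :=
  if f < 0 then "-" ++ String.ofList (pvHexDigs (-f).toNat) else String.ofList (pvHexDigs f.toNat)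

def pv_flag_abbrev (f : Int) : String := pvFLAG_ABBREV.getD f ("?" ++ pvHex f)

-- ===== PORT A =====
-- the 'for slot in range(32): … break' loop, as structural recursion over the slot list
def pvDecodeALoop (seqhis : List Int) (slots : List Int) (steps : List (Int × String)) :
    List (Int × String) :=
  match slots with
  | [] => steps
  | slot :: rest =>
    let iseq := PySem.Int.floordiv slot 16
    let shift := 4 * (slot - iseq * 16)
    -- Python 'x >> shift' is Lean's 'x >>> shift.toNat' (shift is nonnegative here)
    let nibble :=
      if iseq = 0 then PySem.Int.band (PySem.List.pyGetD seqhis 0 0 >>> shift.toNat) 0xF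
      else PySem.Int.band (PySem.List.pyGetD seqhis 1 0 >>> shift.toNat) 0xF
    if nibble = 0 then steps
    else
      let f := pvFFS.getD nibble 0
      pvDecodeALoop seqhis rest (steps ++ [(f, pv_flag_abbrev f)])

def decode_seq_history (seqhis : List Int) : List (Int × String) :=
  pvDecodeALoop seqhis (PySem.List.pyRange 0 32 1) []

-- ===== PORT B =====
-- inner 'for _ in range(16)' loop: returns (steps, stop)
def pvDecodeBInner (v : Int) (fuel : Nat) (steps : List (Int × String)) :
    List (Int × String) × Bool :=
  match fuel with
  | 0 => (steps, false)
  | n + 1 =>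
    let nibble := PySem.Int.band v 0xF
    if nibble = 0 then (steps, true)
    else
      let f := pvFFS.getD nibble 0
      pvDecodeBInner (v >>> (4:Nat)) n (steps ++ [(f, pv_flag_abbrev f)])

-- outer 'for iseq in range(2)' loop with the stop flag
def pvDecodeBOuter (seqhis : List Int) (iseqs : List Int) (steps : List (Int × String)) :
    List (Int × String) :=
  match iseqs with
  | [] => steps
  | i :: rest =>
    let v := PySem.List.pyGetD seqhis i 0
    let r := pvDecodeBInner v 16 steps
    if r.2 then r.1 else pvDecodeBOuter seqhis rest r.1

def decode_seq_history_alt (seqhis : List Int) : List (Int × String) :=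
  pvDecodeBOuter seqhis (PySem.List.pyRange 0 2 1) []

-- ===== PRECONDITION & SPEC =====
-- Pre_ excludes exactly the inputs where Python A raises IndexError: the empty list, and a
-- one-element list whose word has all 16 nibbles nonzero (so seqhis[1] is accessed).
def Pre_decode_seq_history (seqhis : List Int) : Prop :=
  seqhis ≠ [] ∧
  ((∀ j : Nat, j < 16 → PySem.Int.band (PySem.List.pyGetD seqhis 0 0 >>> (4 * j)) 0xF ≠ 0) →
    2 ≤ seqhis.length)

instance (seqhis : List Int) : Decidable (Pre_decode_seq_history seqhis) := by
  unfold Pre_decode_seq_history; infer_instance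

def pvWitness_decode_seq_history : List Int := ([0x5d] : List Int)

def Spec_decode_seq_history (seqhis : List Int) (out : List (Int × String)) : Prop :=
  out = decode_seq_history_alt seqhis
instance (seqhis : List Int) (out : List (Int × String)) :
    Decidable (Spec_decode_seq_history seqhis out) := by
  unfold Spec_decode_seq_history; infer_instance

-- ===== CLAIM (what is proved, stated in full; the proofs are below) =====
def Claim_equal_decode_seq_history : Prop :=
  ∀ (seqhis : List Int), Dom_decode_seq_history seqhis → Pre_decode_seq_history seqhis →
    Spec_decode_seq_history seqhis (decode_seq_history seqhis)

-- ===== LEMMAS AND PROOFS =====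

-- A's slots 16..31 walk the second word exactly like B's inner loop on the shifted word
lemma pv_lemA1 (seqhis : List Int) :
    ∀ (n j : Nat), j + n = 32 → 16 ≤ j → ∀ steps,
      pvDecodeALoop seqhis (PySem.List.pyRange (j : Int) 32 1) steps
      = (pvDecodeBInner (PySem.List.pyGetD seqhis 1 0 >>> (4 * (j - 16))) n steps).1 := by
  intro n
  induction n with
  | zero =>
    intro j hj _ steps
    have h32 : j = 32 := by omega
    subst h32
    rw [PySem.List.pyRange_one_eq_nil (by norm_num)]
    simp [pvDecodeALoop, pvDecodeBInner]
  | succ n ih =>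
    intro j hj hge steps
    rw [PySem.List.pyRange_one_cons (by exact_mod_cast (by omega : (j:Int) < 32))]
    simp only [pvDecodeALoop]
    have hiseq : PySem.Int.floordiv (j : Int) 16 = 1 := by
      rw [PySem.Int.floordiv_eq_iff_of_pos (by norm_num)]
      push_cast; omega
    rw [hiseq]
    have hsh : ((4 : Int) * ((j : Int) - 1 * 16)).toNat = 4 * (j - 16) := by omega
    simp only [if_neg (by norm_num : ¬ (1 : Int) = 0), hsh]
    simp only [pvDecodeBInner]
    by_cases hz : PySem.Int.band (PySem.List.pyGetD seqhis 1 0 >>> (4 * (j - 16))) 0xF = 0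
    · rw [if_pos hz, if_pos hz]
    · rw [if_neg hz, if_neg hz]
      have hcast : ((j : Int) + 1) = (((j + 1 : Nat) : Int)) := by push_cast; ring
      rw [hcast, ih (j + 1) (by omega) (by omega)]
      have hsh2 : (PySem.List.pyGetD seqhis 1 0 >>> (4 * (j - 16))) >>> (4:Nat)
          = PySem.List.pyGetD seqhis 1 0 >>> (4 * (j + 1 - 16)) := by
        rw [← Int.shiftRight_add]; congr 1; omega
      rw [hsh2]

-- A's slots j..31 for j ≤ 16: first word from nibble j on, then (if no zero nibble) the second word
lemma pv_lemA0 (seqhis : List Int) :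
    ∀ (n j : Nat), j + n = 16 → ∀ steps,
      pvDecodeALoop seqhis (PySem.List.pyRange (j : Int) 32 1) steps
      = (let r := pvDecodeBInner (PySem.List.pyGetD seqhis 0 0 >>> (4 * j)) n steps
         if r.2 then r.1 else (pvDecodeBInner (PySem.List.pyGetD seqhis 1 0) 16 r.1).1) := by
  intro n
  induction n with
  | zero =>
    intro j hj steps
    have h16 : j = 16 := by omega
    subst h16
    have h := pv_lemA1 seqhis 16 16 rfl (by norm_num) steps
    simp only [Nat.sub_self, Nat.mul_zero, Int.shiftRight_zero] at h
    rw [h]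
    simp [pvDecodeBInner]
  | succ n ih =>
    intro j hj steps
    rw [PySem.List.pyRange_one_cons (by exact_mod_cast (by omega : (j:Int) < 32))]
    simp only [pvDecodeALoop]
    have hiseq : PySem.Int.floordiv (j : Int) 16 = 0 := by
      rw [PySem.Int.floordiv_eq_iff_of_pos (by norm_num)]
      push_cast; omega
    rw [hiseq]
    have hsh : ((4 : Int) * ((j : Int) - 0 * 16)).toNat = 4 * j := by omega
    rw [if_pos (rfl : (0 : Int) = 0), hsh]
    simp only [pvDecodeBInner]
    by_cases hz : PySem.Int.band (PySem.List.pyGetD seqhis 0 0 >>> (4 * j)) 0xF = 0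
    · rw [if_pos hz, if_pos hz]
      simp
    · rw [if_neg hz, if_neg hz]
      have hcast : ((j : Int) + 1) = (((j + 1 : Nat) : Int)) := by push_cast; ring
      rw [hcast, ih (j + 1) (by omega)]
      have hsh2 : (PySem.List.pyGetD seqhis 0 0 >>> (4 * j)) >>> (4:Nat)
          = PySem.List.pyGetD seqhis 0 0 >>> (4 * (j + 1)) := by
        have h4 : 4 * j + 4 = 4 * (j + 1) := by ring
        rw [← Int.shiftRight_add, h4]
      rw [hsh2]
      rfl

-- ===== VERDICT (by name: the statement is the Claim_ definition above) =====
theorem decode_seq_history_spec : Claim_equal_decode_seq_history := by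
  intro seqhis _ _
  unfold Spec_decode_seq_history decode_seq_history decode_seq_history_alt
  have hA := pv_lemA0 seqhis 16 0 rfl []
  have hR : PySem.List.pyRange 0 2 1 = [0, 1] := by decide
  rw [hR]
  simp only [Nat.cast_zero, Nat.mul_zero, Int.shiftRight_zero] at hA
  rw [hA]
  simp only [pvDecodeBOuter]
  split
  · rfl
  · split <;> rfl
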